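-- pv_equiv track=rewrite | github.com/JWilsonClay/.blueprints | table_formatter.py | split_by_pipes
-- ===== SOURCE A (Python) =====
-- from typing import Iterable, Iterator, List, Set, Tuple
--
-- def find_pipes(line: str) -> List[int]:
--     """
--     Finds indices of pipes that act as column separators,
--     ignoring escaped pipes (\|) and pipes within code spans (`...`).
--     """
--     indices = []
--     i = 0
--     n = len(line)
--     in_code = False
--
--     while i < n:
--         char = line[i]
--
--         if char == '\\':
--             # Skip next char (escaped)
--             i += 2
--             continue
--
--         if char == '`':
--             # Toggle code state
--             in_code = not in_code
--             i += 1
--             continue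
--
--         if char == '|' and not in_code:
--             indices.append(i)
--
--         i += 1
--
--     return indices
--
-- def split_by_pipes(line: str) -> List[str]:
--     """Splits a line into segments based on pipe delimiters."""
--     pipes = find_pipes(line)
--     if not pipes:
--         return [line]
--
--     segments = []
--     last_idx = 0
--     for idx in pipes:
--         segments.append(line[last_idx:idx])
--         last_idx = idx + 1
--     segments.append(line[last_idx:])
--     return segments
-- ===== SOURCE B (Python) =====
-- from typing import List
--
-- def split_by_pipes(line: str) -> List[str]:
--     """Splits a line into segments based on pipe delimiters (single pass)."""
--     segments = []
--     buf = []
--     in_code = False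
--     i = 0
--     n = len(line)
--     while i < n:
--         c = line[i]
--         if c == '\\':
--             buf.append(line[i:i + 2])
--             i += 2
--         elif c == '`':
--             in_code = not in_code
--             buf.append(c)
--             i += 1
--         elif c == '|' and not in_code:
--             segments.append(''.join(buf))
--             buf = []
--             i += 1
--         else:
--             buf.append(c)
--             i += 1
--     segments.append(''.join(buf))
--     return segments
-- ===== Notes on version B (the rewrite author's own statement) =====
-- stated objective: alternative
-- what changed: Replaced the two-phase approach (collect pipe indices, then cut slices with a fold over them) by a single pass over the characters that accumulates the current segment in a buffer and emits it at each unescaped non-code pipe.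
import Mathlib
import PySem

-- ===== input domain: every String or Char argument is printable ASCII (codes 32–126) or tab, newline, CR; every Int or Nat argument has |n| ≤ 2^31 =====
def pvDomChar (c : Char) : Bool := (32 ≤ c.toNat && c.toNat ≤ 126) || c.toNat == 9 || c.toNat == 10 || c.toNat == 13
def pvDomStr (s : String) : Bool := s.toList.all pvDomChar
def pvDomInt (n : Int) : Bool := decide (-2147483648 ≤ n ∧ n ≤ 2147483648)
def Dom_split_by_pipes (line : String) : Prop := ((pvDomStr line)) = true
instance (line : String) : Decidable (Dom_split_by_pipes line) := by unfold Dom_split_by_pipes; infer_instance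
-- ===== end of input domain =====

-- B replaces A's two-phase "collect pipe indices, then cut slices" by a single buffered
-- pass that emits the current segment at each unescaped non-code pipe (alternative, same cost).

-- ===== PORT A =====
-- find_pipes' while-loop over index i (i may jump by 2 on a backslash)
def findPipesAux (cs : List Char) (i : Nat) (inCode : Bool) : List Nat :=
  if h : i < cs.length then
    if cs[i] = '\\' then
      findPipesAux cs (i + 2) inCode
    else if cs[i] = '`' then
      findPipesAux cs (i + 1) (!inCode)
    else if cs[i] = '|' && !inCode then
      i :: findPipesAux cs (i + 1) inCode
    else
      findPipesAux cs (i + 1) inCode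
  else []
termination_by cs.length - i

def split_by_pipes (line : String) : List String :=
  let cs := line.toList
  let pipes := findPipesAux cs 0 false
  if pipes = [] then [line]
  else
    -- for idx in pipes: segments.append(line[last_idx:idx]); last_idx = idx + 1
    let p := pipes.foldl
      (fun (acc : List (List Char) × Nat) (idx : Nat) =>
        (acc.1 ++ [PySem.List.slice cs (some (acc.2 : Int)) (some ((idx : Int)))], idx + 1))
      ([], 0)
    (p.1 ++ [PySem.List.slice cs (some (p.2 : Int)) none]).map String.ofList

-- ===== PORT B =====
-- B's single while-loop: buf accumulates the current segment, segments are emitted at pipes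
def altAux (cs : List Char) (i : Nat) (buf : List Char) (inCode : Bool) : List (List Char) :=
  if h : i < cs.length then
    if cs[i] = '\\' then
      altAux cs (i + 2) (buf ++ PySem.List.slice cs (some (i : Int)) (some ((i : Int) + 2))) inCode
    else if cs[i] = '`' then
      altAux cs (i + 1) (buf ++ [cs[i]]) (!inCode)
    else if cs[i] = '|' && !inCode then
      buf :: altAux cs (i + 1) [] inCode
    else
      altAux cs (i + 1) (buf ++ [cs[i]]) inCode
  else [buf]
termination_by cs.length - i

def split_by_pipes_alt (line : String) : List String :=
  (altAux line.toList 0 [] false).map String.ofList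

-- ===== PRECONDITION & SPEC =====
def Spec_split_by_pipes (line : String) (out : List String) : Prop := out = split_by_pipes_alt line
instance (line : String) (out : List String) : Decidable (Spec_split_by_pipes line out) := by unfold Spec_split_by_pipes; infer_instance

-- ===== CLAIM (what is proved, stated in full; the proofs are below) =====
def Claim_equal_split_by_pipes : Prop := ∀ (line : String), Dom_split_by_pipes line → Spec_split_by_pipes line (split_by_pipes line)

-- ===== LEMMAS AND PROOFS =====

-- the segments A's fold cuts out of cs, described recursively over the pipe list
def segsOf (cs : List Char) (last : Nat) : List Nat → List (List Char)
  | [] => [cs.drop last]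
  | p :: ps => (cs.drop last).take (p - last) :: segsOf cs (p + 1) ps

theorem segsOf_ne_nil (cs : List Char) (last : Nat) (ps : List Nat) :
    segsOf cs last ps ≠ [] := by
  cases ps <;> simp [segsOf]

theorem headI_cons_tail {α : Type} [Inhabited α] (l : List α) (hl : l ≠ []) :
    l.headI :: l.tail = l := by
  cases l with
  | nil => exact absurd rfl hl
  | cons a t => rfl

theorem findPipesAux_lb (cs : List Char) (i : Nat) (b : Bool) :
    ∀ p ∈ findPipesAux cs i b, i ≤ p := by
  induction i, b using findPipesAux.induct cs with
  | case1 i b h hc ih =>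
    intro p hp
    rw [findPipesAux, dif_pos h, if_pos hc] at hp
    have := ih p hp; omega
  | case2 i b h hc hc' ih =>
    intro p hp
    rw [findPipesAux, dif_pos h, if_neg hc, if_pos hc'] at hp
    have := ih p hp; omega
  | case3 i b h hc hc' hc'' ih =>
    intro p hp
    rw [findPipesAux, dif_pos h, if_neg hc, if_neg hc', if_pos hc''] at hp
    rcases List.mem_cons.1 hp with rfl | hp'
    · exact le_refl _
    · have := ih p hp'; omega
  | case4 i b h hc hc' hc'' ih =>
    intro p hp
    rw [findPipesAux, dif_pos h, if_neg hc, if_neg hc', if_neg hc''] at hp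
    have := ih p hp; omega
  | case5 i b h =>
    intro p hp
    rw [findPipesAux, dif_neg h] at hp
    simp at hp

-- pulling the first k characters out of the head segment
theorem segsOf_shift (cs : List Char) (i k : Nat) (ps : List Nat)
    (hps : ∀ p ∈ ps, i + k ≤ p) :
    segsOf cs i ps = ((cs.drop i).take k ++ (segsOf cs (i + k) ps).headI)
      :: (segsOf cs (i + k) ps).tail := by
  cases ps with
  | nil =>
    simp [segsOf, List.headI]
  | cons p ps =>
    have hk : i + k ≤ p := hps p (List.mem_cons_self)
    simp [segsOf, List.headI]
    have : p - i = k + (p - (i + k)) := by omega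
    rw [this, List.take_add, List.drop_drop]

theorem take_one_drop (cs : List Char) (i : Nat) (h : i < cs.length) :
    (cs.drop i).take 1 = [cs[i]] := by
  rw [List.drop_eq_getElem_cons h, List.take_succ_cons, List.take_zero]

-- main invariant: B's buffered pass computes A's segments with buf prepended to the head
theorem altAux_eq (cs : List Char) (i : Nat) (b : Bool) (buf : List Char) :
    altAux cs i buf b =
      (buf ++ (segsOf cs i (findPipesAux cs i b)).headI)
        :: (segsOf cs i (findPipesAux cs i b)).tail := by
  induction i, b using findPipesAux.induct cs generalizing buf with
  | case1 i b h hc ih =>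
    rw [altAux, dif_pos h, if_pos hc, findPipesAux, dif_pos h, if_pos hc, ih]
    rw [segsOf_shift cs i 2 _ (fun p hp => findPipesAux_lb cs (i + 2) b p hp)]
    have hs : PySem.List.slice cs (some (i : Int)) (some ((i : Int) + 2))
        = (cs.drop i).take 2 := by
      rw [show ((i : Int) + 2) = (((i + 2 : Nat)) : Int) by push_cast; ring,
        PySem.List.slice_natCast]
      congr 1
      omega
    simp [hs]
  | case2 i b h hc hc' ih =>
    rw [altAux, dif_pos h, if_neg hc, if_pos hc', findPipesAux, dif_pos h, if_neg hc, if_pos hc', ih]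
    rw [segsOf_shift cs i 1 _ (fun p hp => findPipesAux_lb cs (i + 1) (!b) p hp)]
    simp [take_one_drop cs i h]
  | case3 i b h hc hc' hc'' ih =>
    rw [altAux, dif_pos h, if_neg hc, if_neg hc', if_pos hc'', findPipesAux, dif_pos h,
      if_neg hc, if_neg hc', if_pos hc'', ih]
    simp [segsOf]
    exact headI_cons_tail (segsOf cs (i + 1) (findPipesAux cs (i + 1) b)) (segsOf_ne_nil _ _ _)
  | case4 i b h hc hc' hc'' ih =>
    rw [altAux, dif_pos h, if_neg hc, if_neg hc', if_neg hc'', findPipesAux, dif_pos h,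
      if_neg hc, if_neg hc', if_neg hc'', ih]
    rw [segsOf_shift cs i 1 _ (fun p hp => findPipesAux_lb cs (i + 1) b p hp)]
    simp [take_one_drop cs i h]
  | case5 i b h =>
    rw [altAux, dif_neg h, findPipesAux, dif_neg h]
    have hd : cs.drop i = [] := List.drop_eq_nil_of_le (by omega)
    simp [segsOf, hd]

-- A's fold over the pipe list produces exactly segsOf
theorem foldA_eq (cs : List Char) (ps : List Nat) (acc : List (List Char)) (last : Nat) :
    (let p := ps.foldl
        (fun (acc : List (List Char) × Nat) (idx : Nat) =>
          (acc.1 ++ [PySem.List.slice cs (some (acc.2 : Int)) (some ((idx : Int)))], idx + 1))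
        (acc, last)
     p.1 ++ [PySem.List.slice cs (some (p.2 : Int)) none]) = acc ++ segsOf cs last ps := by
  induction ps generalizing acc last with
  | nil => simp [segsOf, PySem.List.slice_from_natCast]
  | cons p ps ih =>
    simp only [List.foldl_cons]
    rw [ih]
    simp [segsOf, PySem.List.slice_natCast]

-- ===== VERDICT (by name: the statement is the Claim_ definition above) =====
theorem split_by_pipes_spec : Claim_equal_split_by_pipes := by
  intro line _
  show split_by_pipes line = split_by_pipes_alt line
  unfold split_by_pipes split_by_pipes_alt
  rw [altAux_eq]
  simp only [List.nil_append]
  rw [headI_cons_tail _ (segsOf_ne_nil line.toList 0 _)]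
  by_cases hp : findPipesAux line.toList 0 false = []
  · simp [hp, segsOf]
  · rw [if_neg hp, foldA_eq]
    simp
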